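-- pv_equiv track=rewrite | github.com/the-vishh/Intellithon-25 | ml-model/features/js_features.py | _has_auto_redirect
-- ===== SOURCE A (Python) =====
-- def _has_auto_redirect(script_content: str) -> int:
--     """Detect automatic redirects"""
--     redirect_patterns = [
--         "window.location.href",
--         "window.location.replace",
--         "location.href",
--         "location.replace",
--         "document.location",
--         'meta http-equiv="refresh"',
--     ]
--
--     return (
--         1
--         if any(pattern in script_content.lower() for pattern in redirect_patterns)
--         else 0
--     )
-- ===== SOURCE B (Python) =====
-- def _has_auto_redirect(script_content: str) -> int:
--     """Detect automatic redirects via a single automaton-style pass: maintain the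
--     set of still-to-match pattern suffixes (NFA simulation over all six patterns)."""
--     patterns = [
--         "window.location.href",
--         "window.location.replace",
--         "location.href",
--         "location.replace",
--         "document.location",
--         'meta http-equiv="refresh"',
--     ]
--     active = []  # remaining suffix of each partially matched pattern occurrence
--     for c in script_content.lower():
--         nxt = [t[1:] for t in active + patterns if t[0] == c]
--         if "" in nxt:
--             return 1
--         active = nxt
--     return 0
-- ===== Notes on version B (the rewrite author's own statement) =====
-- stated objective: alternative
-- what changed: Replaces six independent substring-containment scans with one automaton-style left-to-right pass that maintains the set of still-to-match pattern suffixes (an NFA simulation over all six patterns), returning 1 the moment any suffix is fully consumed.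
import Mathlib
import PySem

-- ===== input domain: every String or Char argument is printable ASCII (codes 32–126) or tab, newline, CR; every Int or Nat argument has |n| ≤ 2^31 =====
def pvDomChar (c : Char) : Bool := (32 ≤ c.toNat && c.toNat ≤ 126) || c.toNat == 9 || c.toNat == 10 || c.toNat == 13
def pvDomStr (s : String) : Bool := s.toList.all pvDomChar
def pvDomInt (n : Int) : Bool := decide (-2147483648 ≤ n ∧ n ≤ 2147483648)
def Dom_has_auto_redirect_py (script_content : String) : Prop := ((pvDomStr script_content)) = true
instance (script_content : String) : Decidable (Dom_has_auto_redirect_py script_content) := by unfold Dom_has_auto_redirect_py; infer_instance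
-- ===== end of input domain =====

-- B replaces six independent 'pattern in s' containment scans by one left-to-right
-- automaton-style pass maintaining the set of still-to-match pattern suffixes
-- (objective: alternative algorithm).


-- ===== PORT A =====
def pvRedirectPatterns : List String :=
  ["window.location.href", "window.location.replace", "location.href",
   "location.replace", "document.location", "meta http-equiv=\"refresh\""]

def has_auto_redirect_py (script_content : String) : Int :=
  if pvRedirectPatterns.any (fun pattern => PySem.Str.isIn pattern (PySem.Str.lower script_content))
  then 1 else 0

-- ===== PORT B =====
-- the same six patterns, as char lists for the automaton pass
def pvAltPats : List (List Char) := pvRedirectPatterns.map String.toList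

-- 'nxt = [t[1:] for t in active + patterns if t[0] == c]' (t is never empty here:
-- empty suffixes return before being stored, and each pattern is nonempty)
def pvAltStep (c : Char) (ts : List (List Char)) : List (List Char) :=
  ts.filterMap (fun t => match t with
    | [] => none
    | d :: ds => if d = c then some ds else none)

-- the for-loop with early return, as structural recursion over the characters
def pvAltScan (active : List (List Char)) : List Char → Int
  | [] => 0
  | c :: rest =>
      let nxt := pvAltStep c (active ++ pvAltPats)
      if [] ∈ nxt then 1 else pvAltScan nxt rest

def has_auto_redirect_py_alt (script_content : String) : Int :=
  pvAltScan [] (PySem.Str.lower script_content).toList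

-- ===== PRECONDITION & SPEC =====
def Spec_has_auto_redirect_py (script_content : String) (out : Int) : Prop := out = has_auto_redirect_py_alt script_content
instance (script_content : String) (out : Int) : Decidable (Spec_has_auto_redirect_py script_content out) := by unfold Spec_has_auto_redirect_py; infer_instance

-- ===== CLAIM (what is proved, stated in full; the proofs are below) =====
def Claim_equal_has_auto_redirect_py : Prop := ∀ (script_content : String), Dom_has_auto_redirect_py script_content → Spec_has_auto_redirect_py script_content (has_auto_redirect_py script_content)

-- ===== LEMMAS AND PROOFS =====

-- the intended content of the active list after processing prefix u:
-- t is a pattern suffix whose (nonempty) matched prefix q ends exactly at the end of u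
def pvActiveSpec (u t : List Char) : Prop :=
  ∃ p ∈ pvAltPats, ∃ q, q ≠ [] ∧ q ++ t = p ∧ q <:+ u

lemma pvSuffix_concat {α : Type} (q u : List α) (c : α) (hq : q ≠ []) (h : q <:+ u ++ [c]) :
    ∃ q', q = q' ++ [c] ∧ q' <:+ u := by
  rcases List.eq_nil_or_concat q with rfl | ⟨q', d, rfl⟩
  · exact absurd rfl hq
  · obtain ⟨w, hw⟩ := h
    rw [List.concat_eq_append, ← List.append_assoc] at hw
    obtain ⟨h1, h2⟩ := List.append_inj' hw (by simp)
    simp at h2; subst h2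
    exact ⟨q', by simp, ⟨w, h1⟩⟩

lemma pvInfix_concat {α : Type} (p u : List α) (c : α) :
    p <:+: u ++ [c] ↔ p <:+: u ∨ p <:+ u ++ [c] := by
  constructor
  · rintro ⟨s, t, hst⟩
    rcases List.eq_nil_or_concat t with rfl | ⟨t', d, rfl⟩
    · right; exact ⟨s, by simpa using hst⟩
    · left
      rw [List.concat_eq_append] at hst
      rw [show s ++ p ++ (t' ++ [d]) = (s ++ p ++ t') ++ [d] by simp] at hst
      obtain ⟨h1, _⟩ := List.append_inj' hst (by simp)
      exact ⟨s, t', h1⟩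
  · rintro (h | h)
    · exact h.trans (List.prefix_append u [c]).isInfix
    · exact h.isInfix

lemma pvStep_mem (c : Char) (A : List (List Char)) (u : List Char)
    (hA : ∀ t, t ∈ A ↔ pvActiveSpec u t) :
    ∀ t', t' ∈ pvAltStep c (A ++ pvAltPats) ↔ pvActiveSpec (u ++ [c]) t' := by
  intro t'
  have hf : ∀ t : List Char,
      (match t with | [] => none | d :: ds => if d = c then some ds else none) = some t'
        ↔ t = c :: t' := by
    intro t
    cases t with
    | nil => simp
    | cons d ds =>
        by_cases hd : d = c
        · subst hd; simp
        · simp [hd]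
  constructor
  · intro h
    rcases List.mem_filterMap.mp h with ⟨t, ht, hft⟩
    rw [hf t] at hft; subst hft
    rcases List.mem_append.mp ht with hmem | hmem
    · rcases (hA _).mp hmem with ⟨p, hp, q, hq, hqt, hsuf⟩
      obtain ⟨w, hw⟩ := hsuf
      exact ⟨p, hp, q ++ [c], by simp, by simpa using hqt, ⟨w, by simp [← hw]⟩⟩
    · exact ⟨c :: t', hmem, [c], by simp, rfl, (List.suffix_append u [c])⟩
  · rintro ⟨p, hp, q, hq, hqt, hsuf⟩
    obtain ⟨q', rfl, hq'⟩ := pvSuffix_concat q u c hq hsuf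
    apply List.mem_filterMap.mpr
    refine ⟨c :: t', ?_, (hf _).mpr rfl⟩
    apply List.mem_append.mpr
    rcases List.eq_nil_or_concat q' with rfl | hne
    · right
      have : p = c :: t' := by simpa using hqt.symm
      simpa [← this] using hp
    · left
      apply (hA _).mpr
      refine ⟨p, hp, q', ?_, by simpa using hqt, hq'⟩
      rcases hne with ⟨a, b, rfl⟩; simp

lemma pvPats_ne_nil : ∀ p ∈ pvAltPats, p ≠ [] := by decide

lemma pvScan_eq (rest : List Char) : ∀ (u : List Char) (A : List (List Char)),
    (∀ t, t ∈ A ↔ pvActiveSpec u t) → (¬ ∃ p ∈ pvAltPats, p <:+: u) →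
    pvAltScan A rest = if ∃ p ∈ pvAltPats, p <:+: u ++ rest then 1 else 0 := by
  induction rest with
  | nil =>
      intro u A _ hno
      simp only [pvAltScan, List.append_nil]
      rw [if_neg hno]
  | cons c rest ih =>
      intro u A hA hno
      have hmem := pvStep_mem c A u hA
      simp only [pvAltScan]
      by_cases h0 : [] ∈ pvAltStep c (A ++ pvAltPats)
      · rw [if_pos h0, if_pos]
        rcases (hmem []).mp h0 with ⟨p, hp, q, _, hqt, hsuf⟩
        simp only [List.append_nil] at hqt; subst hqt
        refine ⟨q, hp, hsuf.isInfix.trans ?_⟩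
        exact (show u ++ [c] <+: u ++ c :: rest by simp).isInfix
      · rw [if_neg h0]
        have hno' : ¬ ∃ p ∈ pvAltPats, p <:+: u ++ [c] := by
          rintro ⟨p, hp, hinf⟩
          rcases (pvInfix_concat p u c).mp hinf with h | h
          · exact hno ⟨p, hp, h⟩
          · exact h0 ((hmem []).mpr ⟨p, hp, p, pvPats_ne_nil p hp, by simp, h⟩)
        rw [ih (u ++ [c]) _ hmem hno']
        simp

-- ===== VERDICT (by name: the statement is the Claim_ definition above) =====
theorem has_auto_redirect_py_spec : Claim_equal_has_auto_redirect_py := by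
  intro s _
  unfold Spec_has_auto_redirect_py has_auto_redirect_py has_auto_redirect_py_alt
  rw [pvScan_eq _ [] []
      (by
        intro t
        constructor
        · intro h; cases h
        · rintro ⟨p, hp, q, hq, hqt, hsuf⟩; exact (hq (List.suffix_nil.mp hsuf)).elim)
      (by
        rintro ⟨p, hp, hinf⟩
        exact pvPats_ne_nil p hp (List.infix_nil.mp hinf))]
  simp only [List.nil_append]
  congr 1
  simp only [eq_iff_iff, List.any_eq_true, PySem.Str.isIn_iff_infix]
  constructor
  · rintro ⟨p, hp, h⟩
    exact ⟨p.toList, List.mem_map_of_mem hp, h⟩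
  · rintro ⟨p, hp, h⟩
    rcases List.mem_map.mp hp with ⟨q, hq, rfl⟩
    exact ⟨q, hq, h⟩
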